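-- pv_equiv track=rewrite | github.com/talkon/magic-squares | src/py/enumeration.py | gen_rows
-- ===== SOURCE A (Python) =====
-- Vec = tuple[int, int, int, int, int, int]
--
-- tup_bank = {}
--
-- primes = (2, 3, 5, 7, 11, 13, 17, 19, 23)
--
-- def gen_tup(s: int, n: int) -> list[tuple[int, ...]]:
--     if (s, n) in tup_bank.keys():
--         return tup_bank[(s, n)]
--
--     if s == 0:
--         ret = [(0,) * n]
--         tup_bank[(s, n)] = ret
--         return ret
--
--     elif n == 1:
--         ret = [(s,)]
--         tup_bank[(s, n)] = ret
--         return ret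
--
--     out = []
--     for i in range(0, s + 1):
--         prev = gen_tup(s - i, n - 1)
--         out += [(i,) + p for p in prev]
--     tup_bank[(s, n)] = out
--     return out
--
-- def gen_rows(pows: tuple[int, ...], n: int) -> set[Vec]:
--     rows = {(1,) * n}
--     for p, pow in zip(primes, pows):
--         ptups = gen_tup(pow, n)
--         new_rows = set()
--         for row in rows:
--             for tup in ptups:
--                 new_rows.add(
--                     tuple(
--                         sorted(
--                             [elt * (p**r) for elt, r in zip(row, tup)], reverse=True
--                         )
--                     )
--                 )
--         rows = new_rows
--     return rows
-- ===== SOURCE B (Python) =====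
-- PRIMES = (2, 3, 5, 7, 11, 13, 17, 19, 23)
--
-- def _comps(s, n):
--     # all n-tuples of non-negative ints summing to s, in ascending lexicographic order:
--     # grow prefixes position by position, then force the last coordinate
--     if n <= 0:
--         return [()] if s == 0 else []
--     prefixes = [((), 0)]
--     for _ in range(n - 1):
--         prefixes = [(pre + (i,), t + i) for pre, t in prefixes for i in range(s - t + 1)]
--     return [pre + (s - t,) for pre, t in prefixes]
--
-- def gen_rows(pows, n):
--     rows = {(1,) * n}
--     for p, pow in zip(PRIMES, pows):
--         ptups = _comps(pow, n)
--         rows = {tuple(sorted((e * p ** r for e, r in zip(row, tup)), reverse=True))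
--                 for row in rows for tup in ptups}
--     return rows
-- ===== Notes on version B (the rewrite author's own statement) =====
-- stated objective: alternative
-- what changed: B replaces A's memoized suffix-recursion for exponent tuples by an iterative prefix-extension pass that forces the last coordinate, and collapses A's explicit nested insert loops into a single set comprehension per prime.
import Mathlib
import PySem

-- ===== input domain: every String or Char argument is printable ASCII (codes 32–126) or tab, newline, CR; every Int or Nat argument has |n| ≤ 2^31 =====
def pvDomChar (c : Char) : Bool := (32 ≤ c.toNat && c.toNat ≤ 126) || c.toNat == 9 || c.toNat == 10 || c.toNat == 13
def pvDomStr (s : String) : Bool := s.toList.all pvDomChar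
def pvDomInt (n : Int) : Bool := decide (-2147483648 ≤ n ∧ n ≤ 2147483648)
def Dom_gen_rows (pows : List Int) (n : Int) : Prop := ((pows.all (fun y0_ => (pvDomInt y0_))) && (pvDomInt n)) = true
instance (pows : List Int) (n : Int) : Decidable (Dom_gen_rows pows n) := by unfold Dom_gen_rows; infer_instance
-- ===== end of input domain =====

-- B replaces A's memoized suffix-recursion for exponent tuples by an iterative prefix-extension
-- pass, and A's explicit nested insert loops by one set comprehension per prime (objective:
-- alternative decomposition, same asymptotic cost).

-- ===== PORT A =====
-- A's memo table `tup_bank` is a pure cache (it never changes any return value); the port elides it.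
-- `fuel` only makes the recursion structural: the Python recursion steps n down by 1 to the n == 1
-- base, so fuel = (n-1).toNat reproduces it exactly on every input Pre_ admits.
def genTupF (fuel : Nat) (s : Int) (n : Int) : List (List Int) :=
  if s = 0 then [List.replicate n.toNat 0]
  else if n = 1 then [[s]]
  else match fuel with
    | 0 => []
    | f + 1 =>
      (PySem.List.pyRange 0 (s + 1) 1).flatMap
        (fun i => (genTupF f (s - i) (n - 1)).map (fun q => i :: q))

def pvPrimes : List Int := [2, 3, 5, 7, 11, 13, 17, 19, 23]

-- `p ** r` is ported as `p ^ r.toNat`: exact because every exponent in a generated tuple is ≥ 0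
-- on the inputs Pre_ admits.
def gen_rows (pows : List Int) (n : Int) : List (List Int) :=
  (pvPrimes.zip pows).foldl
    (fun rows pr =>
      rows.foldl
        (fun new_rows row =>
          (genTupF (n - 1).toNat pr.2 n).foldl
            (fun nr tup =>
              PySem.Set.add nr
                (PySem.List.sorted ((row.zip tup).map (fun er => er.1 * pr.1 ^ er.2.toNat))
                  (fun x => x) true))
            new_rows)
        PySem.Set.empty)
    (PySem.Set.ofList [List.replicate n.toNat 1])

-- ===== PORT B =====
def compsStep (s : Int) (ps : List (List Int × Int)) : List (List Int × Int) :=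
  ps.flatMap (fun pt =>
    (PySem.List.pyRange 0 (s - pt.2 + 1) 1).map (fun i => (pt.1 ++ [i], pt.2 + i)))

def comps (s : Int) (n : Int) : List (List Int) :=
  if n ≤ 0 then (if s = 0 then [([] : List Int)] else [])
  else
    ((List.range (n - 1).toNat).foldl (fun ps _ => compsStep s ps) [([], 0)]).map
      (fun pt => pt.1 ++ [s - pt.2])

-- the set comprehension consumes the previous set only to build another set, so the result is
-- independent of Python's set iteration order; the port iterates the model's insertion-ordered list
def gen_rows_alt (pows : List Int) (n : Int) : List (List Int) :=
  (pvPrimes.zip pows).foldl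
    (fun rows pr =>
      PySem.Set.ofList
        (rows.flatMap (fun row =>
          (comps pr.2 n).map (fun tup =>
            PySem.List.sorted ((row.zip tup).map (fun er => er.1 * pr.1 ^ er.2.toNat))
              (fun x => x) true))))
    (PySem.Set.ofList [List.replicate n.toNat 1])

-- ===== PRECONDITION & SPEC =====
-- Pre_ excludes n = 1 with a negative zipped power, where A's result set contains floats
-- (p ** negative exponent), outside the declared integer-tuple type, and n ≤ 0 with a positive
-- zipped power, where A's recursion gen_tup(s, n ≤ 0) never reaches a base case and raises
-- RecursionError.
def Pre_gen_rows (pows : List Int) (n : Int) : Prop :=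
  (1 ≤ n ∧ (n = 1 → ∀ x ∈ pows.take 9, 0 ≤ x)) ∨ (n ≤ 0 ∧ ∀ x ∈ pows.take 9, x ≤ 0)
instance (pows : List Int) (n : Int) : Decidable (Pre_gen_rows pows n) := by
  unfold Pre_gen_rows; infer_instance

def pvWitness_gen_rows : List Int × Int := ([2, 1], 3)

def Spec_gen_rows (pows : List Int) (n : Int) (out : List (List Int)) : Prop := out = gen_rows_alt pows n
instance (pows : List Int) (n : Int) (out : List (List Int)) : Decidable (Spec_gen_rows pows n out) := by unfold Spec_gen_rows; infer_instance

-- ===== CLAIM (what is proved, stated in full; the proofs are below) =====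
def Claim_equal_gen_rows : Prop := ∀ (pows : List Int) (n : Int), Dom_gen_rows pows n → Pre_gen_rows pows n → Spec_gen_rows pows n (gen_rows pows n)
-- ===== LEMMAS AND PROOFS =====

-- a fold over `range m` that ignores the index is an iterate
theorem pv_foldl_range_const {α : Type} (g : α → α) (m : Nat) (a : α) :
    (List.range m).foldl (fun x _ => g x) a = g^[m] a := by
  induction m generalizing a with
  | zero => simp
  | succ k ih =>
    rw [List.range_succ, List.foldl_append, ih, Function.iterate_succ_apply']
    simp

theorem pv_genTupF_one (f : Nat) (x : Int) : genTupF f x 1 = [[x]] := by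
  unfold genTupF
  by_cases h : x = 0 <;> simp [h]

theorem pv_genTupF_zero_s (f : Nat) (n : Int) : genTupF f 0 n = [List.replicate n.toNat 0] := by
  unfold genTupF; simp

theorem pv_genTupF_step (f : Nat) (s n : Int) (hs : s ≠ 0) (hn : n ≠ 1) :
    genTupF (f + 1) s n
      = (PySem.List.pyRange 0 (s + 1) 1).flatMap
          (fun i => (genTupF f (s - i) (n - 1)).map (fun q => i :: q)) := by
  rw [genTupF, if_neg hs, if_neg hn]

-- B's prefix-extension iteration, finished by forcing the last coordinate, enumerates exactly
-- A's suffix recursion, for every pending prefix simultaneously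
theorem pv_compsStep_iterate (s : Int) (m : Nat) (ps : List (List Int × Int)) :
    ((compsStep s)^[m] ps).map (fun pt => pt.1 ++ [s - pt.2])
      = ps.flatMap (fun pt =>
          (genTupF m (s - pt.2) ((m : Int) + 1)).map (fun q => pt.1 ++ q)) := by
  induction m generalizing ps with
  | zero =>
    simp [pv_genTupF_one]
    rw [← List.map_eq_flatMap]
  | succ k ih =>
    rw [Function.iterate_succ_apply, ih]
    unfold compsStep
    rw [List.flatMap_assoc]
    apply List.flatMap_congr
    intro pt _
    rw [List.flatMap_map]
    push_cast
    by_cases hx : s - pt.2 = 0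
    · have hr : PySem.List.pyRange 0 (0 + 1) 1 = [0] := by decide
      rw [hx, pv_genTupF_zero_s]
      have h2 : ((k : Int) + 1 + 1).toNat = k + 2 := by omega
      rw [h2, hr]
      have h0 : s - (pt.2 + 0) = 0 := by omega
      simp only [List.flatMap_cons, List.flatMap_nil, List.append_nil, h0, pv_genTupF_zero_s]
      have h1 : ((k : Int) + 1).toNat = k + 1 := by omega
      rw [h1]
      simp [List.replicate_succ]
    · rw [pv_genTupF_step k (s - pt.2) ((k : Int) + 1 + 1) hx (by omega)]
      rw [List.map_flatMap]
      apply List.flatMap_congr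
      intro i _
      rw [List.map_map]
      have e1 : s - (pt.2 + i) = s - pt.2 - i := by omega
      have e2 : (k : Int) + 1 + 1 - 1 = (k : Int) + 1 := by omega
      rw [e1, e2]
      apply List.map_congr_left
      intro q _
      simp

theorem pv_comps_eq_genTup (s n : Int) (hn : 1 ≤ n) :
    comps s n = genTupF (n - 1).toNat s n := by
  unfold comps
  rw [if_neg (by omega : ¬ n ≤ 0)]
  rw [pv_foldl_range_const, pv_compsStep_iterate]
  have hcast : (((n - 1).toNat : Int) + 1) = n := by omega
  rw [hcast]
  simp

theorem pv_comps_eq_genTup_nonpos (s n : Int) (hn : n ≤ 0) :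
    comps s n = genTupF (n - 1).toNat s n := by
  unfold comps
  rw [if_pos hn]
  have hf : (n - 1).toNat = 0 := by omega
  rw [hf]
  by_cases h : s = 0
  · rw [if_pos h, h, pv_genTupF_zero_s]
    have : n.toNat = 0 := by omega
    rw [this]
    rfl
  · rw [if_neg h]
    unfold genTupF
    rw [if_neg h, if_neg (by omega : ¬ n = 1)]

-- A's nested insert-into-a-set loops build precisely the ordered dedup of B's flat comprehension
theorem pv_nested_add_eq_dedup {α β γ : Type} [BEq γ] (rows : List α) (ptups : List β)
    (f : α → β → γ) :
    rows.foldl (fun nr row => ptups.foldl (fun nr tup => PySem.Set.add nr (f row tup)) nr)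
        PySem.Set.empty
      = PySem.List.dedup (rows.flatMap (fun row => ptups.map (f row))) := by
  rw [PySem.List.dedup_eq_ofList, PySem.Set.ofList_eq_foldl, List.foldl_flatMap]
  simp [List.foldl_map, PySem.Set.empty]

-- the two per-prime folds coincide step by step, as soon as the tuple lists coincide per prime
theorem pv_fold_eq (n : Int) (zs : List (Int × Int))
    (hcomps : ∀ pr ∈ zs, comps pr.2 n = genTupF (n - 1).toNat pr.2 n)
    (rows : List (List Int)) :
    zs.foldl
      (fun rows pr =>
        rows.foldl
          (fun new_rows row =>
            (genTupF (n - 1).toNat pr.2 n).foldl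
              (fun nr tup =>
                PySem.Set.add nr
                  (PySem.List.sorted ((row.zip tup).map (fun er => er.1 * pr.1 ^ er.2.toNat))
                    (fun x => x) true))
              new_rows)
          PySem.Set.empty)
      rows
    = zs.foldl
      (fun rows pr =>
        PySem.Set.ofList
          (rows.flatMap (fun row =>
            (comps pr.2 n).map (fun tup =>
              PySem.List.sorted ((row.zip tup).map (fun er => er.1 * pr.1 ^ er.2.toNat))
                (fun x => x) true))))
      rows := by
  induction zs generalizing rows with
  | nil => rfl
  | cons z t ih =>
    simp only [List.foldl_cons]
    rw [pv_nested_add_eq_dedup, PySem.List.dedup_eq_ofList, hcomps z (List.mem_cons_self)]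
    exact ih (fun pr hpr => hcomps pr (List.mem_cons_of_mem _ hpr)) _

theorem gen_rows_spec : Claim_equal_gen_rows := by
  intro pows n _ hpre
  unfold Spec_gen_rows gen_rows gen_rows_alt
  refine pv_fold_eq n _ ?_ _
  intro pr hpr
  rcases hpre with ⟨hn, -⟩ | ⟨hn, -⟩
  · exact pv_comps_eq_genTup _ _ hn
  · exact pv_comps_eq_genTup_nonpos _ _ hn
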